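-- pv_equiv track=rewrite | github.com/manas-17045/LeetcodeSolutions | Leetcode 1501-1600/1505/1505_1.py | minInteger
-- ===== SOURCE A (Python) =====
-- import collections
--
-- class FenwickTree:
--     def __init__(self, size: int):
--         self.treeSize = size + 1
--         self.tree = [0] * self.treeSize
--
--     def update(self, index: int, delta: int):
--         # index is 0-based for the user
--         internalIndex = index + 1   # Convert to 1-basd for internal BIT logic
--         while internalIndex < self.treeSize:
--             self.tree[internalIndex] += delta
--             internalIndex += internalIndex & (-internalIndex)   # Move to next relevant index
--
--     def query(self, index: int) -> int:
--         # Returns prefix sum up to and including index (0-based)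
--         if index < 0:   # Handles query for elements before the 0-th element
--             return 0
--
--         internalIndex = index + 1   # Convert to 1-based for internal BIT logic
--         currentSum = 0
--         while internalIndex > 0:
--             currentSum += self.tree[internalIndex]
--             internalIndex -= internalIndex & (-internalIndex)   # Move to previous relevant index
--         return currentSum
--
-- def minInteger(num: str, k: int) -> str:
--     n = len(num)
--
--     digitOriginalIndices = [collections.deque() for _ in range(10)]
--     for i, charDigit in enumerate(num):
--         digitOriginalIndices[int(charDigit)].append(i)
--
--     bit = FenwickTree(n)
--     for i in range(n):
--         bit.update(i, 1)
--
--     resultChars = []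
--     isPicked = [False] * n
--
--     for _ in range(n):
--         if k == 0:
--             break
--
--         for dValue in range(10):
--             if digitOriginalIndices[dValue]:
--                 originalIdx = digitOriginalIndices[dValue][0]
--
--                 costToMove = bit.query(originalIdx - 1)
--
--                 if costToMove <= k:
--                     resultChars.append(str(dValue))
--                     k -= costToMove
--
--                     bit.update(originalIdx, -1)
--                     isPicked[originalIdx] = True
--                     digitOriginalIndices[dValue].popleft()
--
--                     break
--
--     if len(resultChars) < n:
--         for i in range(n):
--             if not isPicked[i]:
--                 resultChars.append(num[i])
--
--     return "".join(resultChars)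
-- ===== SOURCE B (Python) =====
-- def minInteger(num: str, k: int) -> str:
--     digits = [int(c) for c in num]
--     res = []
--     while k > 0 and digits:
--         window = digits[:k + 1]
--         j = window.index(min(window))
--         res.append(digits.pop(j))
--         k -= j
--     return "".join(map(str, res + digits))
-- ===== Notes on version B (the rewrite author's own statement) =====
-- stated objective: simpler
-- what changed: Replaced the Fenwick-tree cost counting plus ten per-digit index deques by a direct greedy loop on the mutable list of digit values: repeatedly take the leftmost minimum of the window digits[:k+1], pop it (its index is the swap cost), and append the remainder.
import Mathlib
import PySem

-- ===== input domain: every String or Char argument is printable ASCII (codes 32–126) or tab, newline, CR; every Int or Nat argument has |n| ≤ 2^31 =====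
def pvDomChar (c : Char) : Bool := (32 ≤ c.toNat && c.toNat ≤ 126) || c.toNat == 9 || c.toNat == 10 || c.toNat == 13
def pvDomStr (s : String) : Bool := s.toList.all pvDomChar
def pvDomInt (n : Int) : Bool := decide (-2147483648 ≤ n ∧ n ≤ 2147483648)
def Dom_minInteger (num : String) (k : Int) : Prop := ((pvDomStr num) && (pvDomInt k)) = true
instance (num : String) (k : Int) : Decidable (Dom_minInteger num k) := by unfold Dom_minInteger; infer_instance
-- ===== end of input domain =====

-- B replaces A's Fenwick-tree + per-digit-deque machinery by a direct greedy scan of the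
-- shrinking digit-value list (window minimum + pop); objective: simpler, same results.


-- ===== PORT A =====
-- lowest set bit of n (value of Python's `i & -i` for i = n > 0); needed by the ports' termination
def pvLbN (n : Nat) : Nat := n - (n &&& (n-1))

theorem nat_and_odd (m : Nat) : (2*m+1) &&& (2*m) = 2*m := by
  apply Nat.eq_of_testBit_eq; intro i
  rw [Nat.testBit_and]
  cases i with
  | zero => simp [Nat.testBit_zero]
  | succ i =>
      simp only [Nat.testBit_succ]
      have h1 : (2*m+1)/2 = m := by omega
      have h2 : (2*m)/2 = m := by omega
      rw [h1, h2, Bool.and_self]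

theorem nat_and_even (m : Nat) (h : 0 < m) : (2*m) &&& (2*m-1) = 2*(m &&& (m-1)) := by
  apply Nat.eq_of_testBit_eq; intro i
  rw [Nat.testBit_and]
  cases i with
  | zero => simp [Nat.testBit_zero]
  | succ i =>
      simp only [Nat.testBit_succ]
      have h1 : (2*m)/2 = m := by omega
      have h2 : (2*m-1)/2 = m-1 := by omega
      have h3 : (2*(m &&& (m-1)))/2 = m &&& (m-1) := by omega
      rw [h1, h2, h3, Nat.testBit_and]


theorem pvLbN_odd (n : Nat) (h : n % 2 = 1) : pvLbN n = 1 := by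
  obtain ⟨m, rfl⟩ : ∃ m, n = 2*m+1 := ⟨n/2, by omega⟩
  unfold pvLbN
  rw [show 2*m+1-1 = 2*m by omega, nat_and_odd]
  omega

theorem pvLbN_even (m : Nat) : pvLbN (2*m) = 2 * pvLbN m := by
  rcases Nat.eq_zero_or_pos m with rfl | hm
  · decide
  · unfold pvLbN
    rw [nat_and_even m hm]
    have := @Nat.and_le_left m (m-1)
    omega

theorem pvLbN_pos (n : Nat) (h : 0 < n) : 0 < pvLbN n := by
  induction n using Nat.strong_induction_on with
  | _ n ih =>
    rcases Nat.even_or_odd n with ⟨m, hm⟩ | ⟨m, hm⟩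
    · subst hm
      rw [show m + m = 2*m by omega, pvLbN_even]
      have := ih m (by omega) (by omega)
      omega
    · subst hm; rw [pvLbN_odd (2*m+1) (by omega)]; omega

theorem pvLbN_le (n : Nat) : pvLbN n ≤ n := Nat.sub_le _ _

-- Python's `i & -i` for an int i ≥ 1 is the lowest set bit of i (two's complement)
theorem pvBand_neg (n : Nat) (h : 0 < n) :
    PySem.Int.band (n : Int) (-(n : Int)) = (pvLbN n : Int) := by
  unfold PySem.Int.band
  rw [if_pos (by positivity), if_neg (by omega)]
  have h1 : (-(-(n:Int)) - 1).toNat = n - 1 := by omega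
  have h2 : ((n:Int)).toNat = n := by omega
  rw [h1, h2]
  unfold pvLbN
  congr 1

theorem pvBand_bounds (ii : Int) (h : 1 ≤ ii) :
    1 ≤ PySem.Int.band ii (-ii) ∧ PySem.Int.band ii (-ii) ≤ ii := by
  obtain ⟨n, rfl⟩ : ∃ n : Nat, ii = (n : Int) := ⟨ii.toNat, by omega⟩
  rw [pvBand_neg n (by omega)]
  have h1 := pvLbN_pos n (by omega)
  have h2 := pvLbN_le n
  omega

-- `FenwickTree.update` inner while-loop (tree[ii] += delta; ii += ii & -ii).
-- The guard `1 ≤ ii` is a totality guard only: update is always entered with ii = index+1 ≥ 1.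
def fenUpGo (treeSize delta : Int) (tree : List Int) (ii : Int) : List Int :=
  if h : 1 ≤ ii ∧ ii < treeSize then
    fenUpGo treeSize delta
      (PySem.List.pySetD tree ii (PySem.List.pyGetD tree ii 0 + delta))
      (ii + PySem.Int.band ii (-ii))
  else tree
termination_by (treeSize - ii).toNat
decreasing_by
  have h2 := pvBand_bounds ii h.1
  omega

-- `FenwickTree.update(index, delta)`
def fenUpdate (treeSize : Int) (tree : List Int) (index delta : Int) : List Int :=
  fenUpGo treeSize delta tree (index + 1)

-- `FenwickTree.query` inner while-loop (sum += tree[ii]; ii -= ii & -ii)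
def fenQGo (tree : List Int) (ii : Int) (acc : Int) : Int :=
  if h : 0 < ii then
    fenQGo tree (ii - PySem.Int.band ii (-ii)) (acc + PySem.List.pyGetD tree ii 0)
  else acc
termination_by ii.toNat
decreasing_by
  have h2 := pvBand_bounds ii h
  omega

-- `FenwickTree.query(index)`
def fenQuery (tree : List Int) (index : Int) : Int :=
  if index < 0 then 0 else fenQGo tree (index + 1) 0

-- `int(charDigit)`; the `.getD 0` arm is unreachable under Pre_ (int() raises there)
def pvDigit (c : Char) : Int := (PySem.Int.ofChars? [c]).getD 0

structure PvStA where
  k : Int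
  dio : List (List Int)
  bit : List Int
  picked : List Bool
  res : List Char

-- the inner `for dValue in range(10)` loop (break = return)
def pvScanA (n : Nat) (ds : List Int) (st : PvStA) : PvStA :=
  match ds with
  | [] => st
  | d :: ds' =>
    match PySem.List.pyGetD st.dio d [] with
    | [] => pvScanA n ds' st
    | oi :: rest =>
      let cost := fenQuery st.bit (oi - 1)
      if cost ≤ st.k then
        { k := st.k - cost,
          dio := PySem.List.pySetD st.dio d rest,   -- popleft()
          bit := fenUpdate ((n : Int)+1) st.bit oi (-1),
          picked := PySem.List.pySetD st.picked oi true,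
          res := st.res ++ PySem.Int.toChars d }    -- append(str(dValue))
      else pvScanA n ds' st

-- the outer `for _ in range(n)` loop with its `if k == 0: break`
def pvLoopA (n : Nat) : Nat → PvStA → PvStA
  | 0, st => st
  | f+1, st => if st.k = 0 then st else pvLoopA n f (pvScanA n (PySem.List.pyRange 0 10 1) st)

def minInteger (num : String) (k : Int) : String :=
  let cs := num.toList
  let n := cs.length
  let dio := (PySem.List.enumerate cs 0).foldl
      (fun dio p =>
        let d := pvDigit p.2
        PySem.List.pySetD dio d (PySem.List.pyGetD dio d [] ++ [p.1]))
      (List.replicate 10 [])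
  let bit := (PySem.List.pyRange 0 (n : Int) 1).foldl
      (fun t i => fenUpdate ((n : Int)+1) t i 1) (List.replicate (n+1) 0)
  let stF := pvLoopA n n { k := k, dio := dio, bit := bit, picked := List.replicate n false, res := [] }
  let res2 := if stF.res.length < n then
      (PySem.List.pyRange 0 (n : Int) 1).foldl
        (fun r i => if PySem.List.pyGetD stF.picked i false then r
                    else r ++ [PySem.List.pyGetD cs i ' '])   -- num[i], i in range(n)
        stF.res
    else stF.res
  String.ofList res2   -- "".join

-- ===== PORT B =====
-- the `while k > 0 and digits` loop of Source B on the list of digit VALUES;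
-- the `none` arms are unreachable (window is nonempty, its minimum is a member, j is in range)
def pvLoopBI (fuel : Nat) (k : Int) (digits : List Int) (res : List Int) : List Int :=
  match fuel with
  | 0 => res ++ digits   -- fuel is a totality guard only: digits.length steps always suffice
  | fuel+1 =>
  if 0 < k ∧ digits ≠ [] then
    let window := PySem.List.slice digits none (some (k+1))   -- digits[:k+1]
    match PySem.List.min? window (fun c => c) with            -- min(window)
    | none => res ++ digits
    | some m =>
      match PySem.List.index? window m with                   -- window.index(…)
      | none => res ++ digits
      | some j =>
        match PySem.List.pop? digits (j : Int) with           -- digits.pop(j)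
        | none => res ++ digits
        | some cr => pvLoopBI fuel (k - (j : Int)) cr.2 (res ++ [cr.1])
  else res ++ digits

def minInteger_alt (num : String) (k : Int) : String :=
  let digits := num.toList.map pvDigit   -- [int(c) for c in num] (pvDigit = int(c), shared with port A)
  String.ofList ((pvLoopBI digits.length k digits []).flatMap PySem.Int.toChars)
  -- "".join(map(str, res + digits))

-- ===== PRECONDITION & SPEC =====
-- Pre_ excludes exactly the inputs where `int(c)` raises ValueError (strings with a character
-- that is not one of '0'..'9'); both A and B raise there.
def Pre_minInteger (num : String) (k : Int) : Prop :=
  (num.toList.all (fun c => 48 ≤ c.toNat && c.toNat ≤ 57)) = true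
instance (num : String) (k : Int) : Decidable (Pre_minInteger num k) := by
  unfold Pre_minInteger; infer_instance

def pvWitness_minInteger : String × Int := ("4321", 4)

def Spec_minInteger (num : String) (k : Int) (out : String) : Prop := out = minInteger_alt num k
instance (num : String) (k : Int) (out : String) : Decidable (Spec_minInteger num k out) := by
  unfold Spec_minInteger; infer_instance

-- ===== CLAIM (what is proved, stated in full; the proofs are below) =====
def Claim_equal_minInteger : Prop := ∀ (num : String) (k : Int), Dom_minInteger num k → Pre_minInteger num k → Spec_minInteger num k (minInteger num k)

-- ===== LEMMAS AND PROOFS =====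

-- ---- proof-side model of B's loop over the digit CHARACTERS ----
def pvLoopB (fuel : Nat) (k : Int) (digits : List Char) (res : List Char) : List Char :=
  match fuel with
  | 0 => res ++ digits
  | fuel+1 =>
  if 0 < k ∧ digits ≠ [] then
    let window := PySem.List.slice digits none (some (k+1))
    match PySem.List.min? window (fun c => c) with
    | none => res ++ digits
    | some m =>
      match PySem.List.index? window m with
      | none => res ++ digits
      | some j =>
        match PySem.List.pop? digits (j : Int) with
        | none => res ++ digits
        | some cr => pvLoopB fuel (k - (j : Int)) cr.2 (res ++ [cr.1])
  else res ++ digits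

-- ---- lowest-set-bit arithmetic ----
theorem pvLbN_dvd (n : Nat) : pvLbN n ∣ n := by
  induction n using Nat.strong_induction_on with
  | _ n ih =>
    rcases Nat.eq_zero_or_pos n with rfl | hn
    · simp
    rcases Nat.even_or_odd n with ⟨m, hm⟩ | ⟨m, hm⟩
    · subst hm
      rw [show m + m = 2*m by omega, pvLbN_even]
      exact Nat.mul_dvd_mul_left 2 (ih m (by omega))
    · subst hm; rw [pvLbN_odd (2*m+1) (by omega)]; exact Nat.one_dvd _

theorem pvLbN_add_small (n r : Nat) (h0 : 0 < r) (h : r < pvLbN n) :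
    pvLbN (n + r) = pvLbN r := by
  induction n using Nat.strong_induction_on generalizing r with
  | _ n ih =>
    rcases Nat.eq_zero_or_pos n with rfl | hn
    · unfold pvLbN at h; omega
    rcases Nat.even_or_odd n with ⟨m, hm⟩ | ⟨m, hm⟩
    · subst hm
      rw [show m + m = 2*m by omega] at h ⊢
      rw [pvLbN_even] at h
      rcases Nat.even_or_odd r with ⟨s, hs⟩ | ⟨s, hs⟩
      · subst hs
        rw [show s + s = 2*s by omega] at h ⊢
        rw [show 2*m + 2*s = 2*(m+s) by omega, pvLbN_even, pvLbN_even]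
        rw [ih m (by omega) s (by omega) (by omega)]
      · subst hs; rw [pvLbN_odd (2*m+(2*s+1)) (by omega), pvLbN_odd (2*s+1) (by omega)]
    · rw [pvLbN_odd n (by omega)] at h; omega

theorem pvLbN_sub_double (n : Nat) (h0 : 0 < n) (h : n - pvLbN n ≠ 0) :
    2 * pvLbN n ≤ pvLbN (n - pvLbN n) := by
  induction n using Nat.strong_induction_on with
  | _ n ih =>
    rcases Nat.even_or_odd n with ⟨m, hm⟩ | ⟨m, hm⟩
    · subst hm
      rw [show m + m = 2*m by omega] at h ⊢
      rw [pvLbN_even] at h ⊢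
      rw [show 2*m - 2*pvLbN m = 2*(m - pvLbN m) by omega, pvLbN_even]
      have hm0 : 0 < m := by omega
      have := ih m (by omega) hm0 (by omega)
      omega
    · subst hm
      have h1 := pvLbN_odd (2*m+1) (by omega)
      rw [h1]
      rw [h1] at h
      obtain ⟨s, hs⟩ : ∃ s, 2*m+1 - 1 = 2*s := ⟨m, by omega⟩
      rw [hs, pvLbN_even]
      have := pvLbN_pos s (by omega)
      omega

theorem pvLbN_chain_dvd (a b : Nat) : pvLbN a ∣ pvLbN b ∨ pvLbN b ∣ pvLbN a := by
  induction a using Nat.strong_induction_on generalizing b with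
  | _ a ih =>
    rcases Nat.eq_zero_or_pos a with rfl | ha
    · right; simp [show pvLbN 0 = 0 from by decide]
    rcases Nat.eq_zero_or_pos b with rfl | hb
    · left; simp [show pvLbN 0 = 0 from by decide]
    rcases Nat.even_or_odd a with ⟨m, hm⟩ | ⟨m, hm⟩
    · rcases Nat.even_or_odd b with ⟨s, hs⟩ | ⟨s, hs⟩
      · subst hm hs
        rw [show m + m = 2*m by omega, show s + s = 2*s by omega, pvLbN_even, pvLbN_even]
        rcases ih m (by omega) s with h | h
        · exact Or.inl (Nat.mul_dvd_mul_left 2 h)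
        · exact Or.inr (Nat.mul_dvd_mul_left 2 h)
      · right; subst hs; rw [pvLbN_odd (2*s+1) (by omega)]; exact Nat.one_dvd _
    · left; subst hm; rw [pvLbN_odd (2*m+1) (by omega)]; exact Nat.one_dvd _

-- the Fenwick update chain {j : ii ≤ j ∧ j - lb j < ii}: membership is stable under
-- stepping ii ↦ ii + lb ii (for j ≠ ii)
theorem pvChain_step (ii j : Nat) (hii : 1 ≤ ii) (hne : j ≠ ii) :
    (ii + pvLbN ii ≤ j ∧ j - pvLbN j < ii + pvLbN ii) ↔ (ii ≤ j ∧ j - pvLbN j < ii) := by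
  constructor
  · rintro ⟨h1, h2⟩
    have hj : 0 < j := by have := pvLbN_pos ii hii; omega
    have hlbj := pvLbN_pos j hj
    refine ⟨by have := pvLbN_pos ii hii; omega, ?_⟩
    by_contra hc
    push Not at hc
    -- c := j - pvLbN j lies in [ii, ii + pvLbN ii)
    set L := pvLbN ii with hL
    set c := j - pvLbN j with hc'
    have hLpos : 0 < L := pvLbN_pos ii hii
    have hcne : c ≠ 0 := by omega
    have hdouble : 2 * pvLbN j ≤ pvLbN c := pvLbN_sub_double j hj (by omega)
    have hjc : j = c + pvLbN j := by have := pvLbN_le j; omega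
    rcases Nat.eq_or_lt_of_le hc with hceq | hclt
    · -- c = ii
      have : pvLbN c = L := by rw [← hceq]
      omega
    · -- c = ii + r, 0 < r < L
      set r := c - ii with hr
      have hrpos : 0 < r := by omega
      have hrL : r < L := by omega
      have hcr : c = ii + r := by omega
      have hlbc : pvLbN c = pvLbN r := by rw [hcr]; exact pvLbN_add_small ii r hrpos (by omega)
      have hlbr_le : pvLbN r ≤ r := le_trans (pvLbN_le r) (le_refl r)
      have hlbr_pos : 0 < pvLbN r := pvLbN_pos r hrpos
      -- pvLbN r divides L
      have hdvdL : pvLbN r ∣ L := by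
        rcases pvLbN_chain_dvd r ii with hd | hd
        · exact hd
        · exfalso
          have : L ≤ pvLbN r := Nat.le_of_dvd hlbr_pos hd
          omega
      have hdvdr : pvLbN r ∣ r := pvLbN_dvd r
      have hdvdsub : pvLbN r ∣ L - r := Nat.dvd_sub hdvdL hdvdr
      have hsub : pvLbN r ≤ L - r := Nat.le_of_dvd (by omega) hdvdsub
      omega
  · rintro ⟨h1, h2⟩
    refine ⟨?_, by have := pvLbN_pos ii hii; omega⟩
    by_contra hc
    push Not at hc
    -- ii < j < ii + pvLbN ii
    have hjgt : ii < j := by omega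
    set r := j - ii with hr
    have hrpos : 0 < r := by omega
    have hrL : r < pvLbN ii := by omega
    have hjr : j = ii + r := by omega
    have : pvLbN j = pvLbN r := by rw [hjr]; exact pvLbN_add_small ii r hrpos hrL
    have := pvLbN_le r
    omega

-- ---- Fenwick loops ----
theorem getD_set' {α : Type} (xs : List α) (m j : Nat) (v d : α) (h : m < xs.length) :
    (xs.set m v).getD j d = if j = m then v else xs.getD j d := by
  rw [List.getD_eq_getElem?_getD, List.getD_eq_getElem?_getD, List.getElem?_set]
  rcases eq_or_ne j m with rfl | hne
  · simp [h]
  · simp [Ne.symm hne, hne]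

theorem pvUpGo_length (ts δ : Int) (tree : List Int) (ii : Int) :
    (fenUpGo ts δ tree ii).length = tree.length := by
  fun_induction fenUpGo ts δ tree ii with
  | case1 tree ii h ih => rw [ih, PySem.List.length_pySetD]
  | case2 => rfl

theorem pvUpGo_getD_aux (ts δ : Int) (M : Nat) :
    ∀ (m : Nat) (tree : List Int), (ts - (m : Int)).toNat ≤ M → 1 ≤ m →
      ts ≤ (tree.length : Int) → ∀ j : Nat,
    (fenUpGo ts δ tree (m : Int)).getD j 0 =
      tree.getD j 0 + (if m ≤ j ∧ j - pvLbN j < m ∧ (j : Int) < ts then δ else 0) := by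
  induction M with
  | zero =>
    intro m tree hM hm hts j
    rw [fenUpGo]
    rw [dif_neg (by omega)]
    have : ¬ (m ≤ j ∧ j - pvLbN j < m ∧ (j : Int) < ts) := by omega
    rw [if_neg this, add_zero]
  | succ M ih =>
    intro m tree hM hm hts j
    rw [fenUpGo]
    by_cases h : 1 ≤ (m : Int) ∧ (m : Int) < ts
    · rw [dif_pos h]
      have hmlen : m < tree.length := by omega
      have hlb1 := pvLbN_pos m (by omega)
      have hlb2 := pvLbN_le m
      rw [pvBand_neg m (by omega)]
      have hcast : (m : Int) + (pvLbN m : Int) = ((m + pvLbN m : Nat) : Int) := by push_cast; ring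
      rw [hcast]
      have hlen' : ts ≤ ((PySem.List.pySetD tree (m : Int) (PySem.List.pyGetD tree (m : Int) 0 + δ)).length : Int) := by
        rw [PySem.List.length_pySetD]; exact hts
      rw [ih (m + pvLbN m) _ (by omega) (by omega) hlen' j]
      rw [PySem.List.pySetD_of_nonneg tree _ (by omega)]
      have hton : ((m : Int)).toNat = m := by omega
      rw [hton, getD_set' tree m j _ _ hmlen]
      rcases eq_or_ne j m with rfl | hne
      · rw [if_pos rfl, PySem.List.pyGetD_natCast]
        have h1 : ¬ (j + pvLbN j ≤ j ∧ j - pvLbN j < j + pvLbN j ∧ (j : Int) < ts) := by omega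
        have h2 : (j ≤ j ∧ j - pvLbN j < j ∧ (j : Int) < ts) := by
          refine ⟨le_refl _, ?_, by omega⟩
          have := pvLbN_pos j (by omega); omega
        rw [if_neg h1, if_pos h2, add_zero]
      · rw [if_neg hne]
        congr 1
        have hstep := pvChain_step m j (by omega) hne
        by_cases hj : (j : Int) < ts
        · rcases (em (m ≤ j ∧ j - pvLbN j < m)) with hIn | hOut
          · rw [if_pos ⟨(hstep.mpr hIn).1, (hstep.mpr hIn).2, hj⟩, if_pos ⟨hIn.1, hIn.2, hj⟩]
          · rw [if_neg (by intro hc; exact hOut (hstep.mp ⟨hc.1, hc.2.1⟩)),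
               if_neg (by intro hc; exact hOut ⟨hc.1, hc.2.1⟩)]
        · rw [if_neg (by omega), if_neg (by omega)]
    · rw [dif_neg h]
      have : ¬ (m ≤ j ∧ j - pvLbN j < m ∧ (j : Int) < ts) := by omega
      rw [if_neg this, add_zero]

theorem pvUpGo_getD (ts δ : Int) (tree : List Int) (m : Nat) (hm : 1 ≤ m)
    (hts : ts ≤ (tree.length : Int)) (j : Nat) :
    (fenUpGo ts δ tree (m : Int)).getD j 0 =
      tree.getD j 0 + (if m ≤ j ∧ j - pvLbN j < m ∧ (j : Int) < ts then δ else 0) :=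
  pvUpGo_getD_aux ts δ (ts - (m : Int)).toNat m tree (le_refl _) hm hts j

def pvBitInv (n : Nat) (f : Nat → Int) (tree : List Int) : Prop :=
  tree.length = n + 1 ∧
  ∀ j : Nat, 1 ≤ j → j ≤ n → tree.getD j 0 = ∑ x ∈ Finset.Ioc (j - pvLbN j) j, f x

theorem pvBitInv_update (n : Nat) (f : Nat → Int) (tree : List Int) (m : Nat) (δ : Int)
    (hInv : pvBitInv n f tree) (hm1 : 1 ≤ m) (hmn : m ≤ n) :
    pvBitInv n (fun x => f x + if x = m then δ else 0)
      (fenUpdate ((n : Int)+1) tree ((m : Int) - 1) δ) := by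
  obtain ⟨hlen, hsum⟩ := hInv
  unfold fenUpdate
  have harg : (m : Int) - 1 + 1 = (m : Int) := by ring
  rw [harg]
  constructor
  · rw [pvUpGo_length]; exact hlen
  · intro j hj1 hjn
    rw [pvUpGo_getD _ _ _ _ hm1 (by omega) j, hsum j hj1 hjn]
    have hlbj := pvLbN_pos j (by omega)
    have hlbj2 := pvLbN_le j
    rw [Finset.sum_add_distrib]
    congr 1
    have : ∑ x ∈ Finset.Ioc (j - pvLbN j) j, (if x = m then δ else 0) =
        if m ∈ Finset.Ioc (j - pvLbN j) j then δ else 0 := Finset.sum_ite_eq' _ m (fun _ => δ)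
    rw [this]
    by_cases hc : j - pvLbN j < m ∧ m ≤ j
    · rw [if_pos (by omega), if_pos (Finset.mem_Ioc.mpr hc)]
    · rw [if_neg (by omega), if_neg (fun hmem => hc (Finset.mem_Ioc.mp hmem))]

theorem pvQGo_sum (n : Nat) (f : Nat → Int) (tree : List Int) (hInv : pvBitInv n f tree)
    (m : Nat) (hm : m ≤ n) (acc : Int) :
    fenQGo tree (m : Int) acc = acc + ∑ x ∈ Finset.Ioc 0 m, f x := by
  induction m using Nat.strong_induction_on generalizing acc with
  | _ m ih =>
    rcases Nat.eq_zero_or_pos m with rfl | hm0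
    · rw [fenQGo, dif_neg (by omega)]; simp
    · rw [fenQGo, dif_pos (by exact_mod_cast hm0)]
      rw [pvBand_neg m hm0]
      have hlb1 := pvLbN_pos m hm0
      have hlb2 := pvLbN_le m
      have hcast : (m : Int) - (pvLbN m : Int) = ((m - pvLbN m : Nat) : Int) := by omega
      rw [hcast, ih (m - pvLbN m) (by omega) (by omega)]
      rw [PySem.List.pyGetD_natCast, hInv.2 m (by omega) hm]
      rw [show ∑ x ∈ Finset.Ioc 0 m, f x = ∑ x ∈ Finset.Ioc 0 (m - pvLbN m), f x
            + ∑ x ∈ Finset.Ioc (m - pvLbN m) m, f x from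
          (Finset.sum_Ioc_consecutive _ (Nat.zero_le _) (Nat.sub_le _ _)).symm]
      ring

-- ---- relating the BIT contents to the list of still-available indices ----
def pvCharAt (cs : List Char) (i : Int) : Char := PySem.List.pyGetD cs i ' '
def pvRem (cs : List Char) (avail : List Int) : List Char := avail.map (pvCharAt cs)
def pvAFn (avail : List Int) (x : Nat) : Int := if ((x : Int) - 1) ∈ avail then 1 else 0
def pvDigitChar (d : Int) : Char := Char.ofNat (48 + d.toNat)

theorem pvSum_indicator (avail : List Int) (hnd : avail.Nodup)
    (hb : ∀ i ∈ avail, 0 ≤ i) (m : Nat) :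
    ∑ x ∈ Finset.Ioc 0 m, pvAFn avail x = ((avail.filter (fun y => y < (m : Int))).length : Int) := by
  induction avail with
  | nil => simp [pvAFn]
  | cons a t ih =>
    have hant : a ∉ t := (List.nodup_cons.mp hnd).1
    have hndt : t.Nodup := (List.nodup_cons.mp hnd).2
    have ha0 : 0 ≤ a := hb a (List.mem_cons_self)
    have hbt : ∀ i ∈ t, 0 ≤ i := fun i hi => hb i (List.mem_cons_of_mem _ hi)
    have hpt : ∀ x ∈ Finset.Ioc 0 m, pvAFn (a :: t) x =
        (if x = a.toNat + 1 then (1:Int) else 0) + pvAFn t x := by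
      intro x hx
      simp only [pvAFn, List.mem_cons]
      by_cases hxa : (x:Int) - 1 = a
      · have hxt : ¬ ((x:Int) - 1 ∈ t) := by rw [hxa]; exact hant
        rw [if_pos (Or.inl hxa), if_pos (by omega), if_neg hxt]; norm_num
      · have hne : ¬ (x = a.toNat + 1) := by intro hcon; apply hxa; omega
        by_cases hxt : (x:Int) - 1 ∈ t
        · rw [if_pos (Or.inr hxt), if_neg hne, if_pos hxt]; norm_num
        · rw [if_neg (show ¬((x:Int)-1 = a ∨ (x:Int)-1 ∈ t) from by tauto),
              if_neg hne, if_neg hxt]; norm_num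
    rw [Finset.sum_congr rfl hpt, Finset.sum_add_distrib, ih hndt hbt]
    rw [Finset.sum_ite_eq' (Finset.Ioc 0 m) (a.toNat+1) (fun _ => (1:Int))]
    rw [List.filter_cons]
    by_cases hc : a < (m:Int)
    · rw [if_pos (Finset.mem_Ioc.mpr ⟨by omega, by omega⟩)]
      simp only [hc, decide_true]
      push_cast [List.length_cons]
      ring
    · rw [if_neg (by rw [Finset.mem_Ioc]; omega)]
      simp only [hc, decide_false]
      norm_num

theorem pvQuery_count (n : Nat) (avail : List Int) (tree : List Int)
    (hInv : pvBitInv n (pvAFn avail) tree) (hnd : avail.Nodup)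
    (hb : ∀ i ∈ avail, 0 ≤ i) (oi : Int) (h0 : 0 ≤ oi) (h1 : oi ≤ (n : Int)) :
    fenQuery tree (oi - 1) = ((avail.filter (fun y => y < oi)).length : Int) := by
  unfold fenQuery
  by_cases hneg : oi - 1 < 0
  · rw [if_pos hneg]
    have hnil : avail.filter (fun y => y < oi) = [] := by
      rw [List.filter_eq_nil_iff]
      intro y hy
      have := hb y hy
      simp only [decide_eq_true_eq]
      omega
    rw [hnil]; rfl
  · rw [if_neg hneg]
    have harg : oi - 1 + 1 = ((oi.toNat : Nat) : Int) := by omega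
    rw [harg, pvQGo_sum n _ tree hInv oi.toNat (by omega) 0,
        pvSum_indicator avail hnd hb oi.toNat]
    have hcast : ((oi.toNat : Nat) : Int) = oi := by omega
    rw [hcast]
    ring

-- ---- list and digit-character helpers ----
theorem pvChar_le_iff (c d : Char) : c ≤ d ↔ c.toNat ≤ d.toNat := by
  simp [Char.le_def, UInt32.le_iff_toNat_le]

theorem pvNodup (l : List Int) (h : l.Pairwise (· < ·)) : l.Nodup :=
  h.imp (fun hab => ne_of_lt hab)

theorem pvChar_cases (c : Char) (h1 : 48 ≤ c.toNat) (h2 : c.toNat ≤ 57) :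
    c = '0' ∨ c = '1' ∨ c = '2' ∨ c = '3' ∨ c = '4' ∨ c = '5' ∨ c = '6' ∨ c = '7' ∨ c = '8' ∨ c = '9' := by
  have hofn : Char.ofNat c.toNat = c := Char.ofNat_toNat c
  have h3 : c.toNat = 48 ∨ c.toNat = 49 ∨ c.toNat = 50 ∨ c.toNat = 51 ∨ c.toNat = 52 ∨
      c.toNat = 53 ∨ c.toNat = 54 ∨ c.toNat = 55 ∨ c.toNat = 56 ∨ c.toNat = 57 := by omega
  rcases h3 with h|h|h|h|h|h|h|h|h|h <;> rw [h] at hofn <;> rw [← hofn] <;> simp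

theorem pvDigit_facts (c : Char) (h1 : 48 ≤ c.toNat) (h2 : c.toNat ≤ 57) :
    0 ≤ pvDigit c ∧ pvDigit c < 10 ∧ pvDigitChar (pvDigit c) = c ∧
      PySem.Int.toChars (pvDigit c) = [c] ∧ (pvDigit c) = (c.toNat : Int) - 48 := by
  rcases pvChar_cases c h1 h2 with rfl|rfl|rfl|rfl|rfl|rfl|rfl|rfl|rfl|rfl <;>
    exact ⟨by decide, by decide, by decide, by decide, by decide⟩

-- position of the j-th element of a strictly sorted list = number of smaller elements
theorem pvPos_count (oi : Int) : ∀ (avail : List Int), avail.Pairwise (· < ·) →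
    ∀ j (hj : j < avail.length), avail[j] = oi →
    (avail.filter (fun y => decide (y < oi))).length = j := by
  intro avail
  induction avail with
  | nil => intro _ j hj; simp at hj
  | cons a t ih =>
    intro hs j hj hoi
    have hhead := (List.pairwise_cons.mp hs).1
    have htail := (List.pairwise_cons.mp hs).2
    cases j with
    | zero =>
      simp only [List.getElem_cons_zero] at hoi; subst hoi
      simp only [List.filter_cons]
      rw [if_neg (by simp)]
      rw [show List.filter (fun y => decide (y < a)) t = [] from by
        rw [List.filter_eq_nil_iff]
        intro y hy
        simp only [decide_eq_true_eq]
        have := hhead y hy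
        omega]
      rfl
    | succ j =>
      have hjt : j < t.length := by simpa using hj
      simp only [List.getElem_cons_succ] at hoi
      simp only [List.filter_cons]
      rw [if_pos (by simp only [decide_eq_true_eq]; exact hoi ▸ hhead _ (List.getElem_mem hjt))]
      rw [List.length_cons, ih htail j hjt hoi]

theorem pvEraseIdx_filter (oi : Int) : ∀ (avail : List Int) (j : Nat), avail.Nodup →
    ∀ (hj : j < avail.length), avail[j] = oi →
    avail.eraseIdx j = avail.filter (fun y => decide (y ≠ oi)) := by
  intro avail
  induction avail with
  | nil => intro j _ hj; simp at hj
  | cons a t ih =>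
    intro j hnd hj hoi
    have hant : a ∉ t := (List.nodup_cons.mp hnd).1
    have hndt : t.Nodup := (List.nodup_cons.mp hnd).2
    cases j with
    | zero =>
      simp only [List.getElem_cons_zero] at hoi
      subst hoi
      simp only [List.eraseIdx_zero, List.filter_cons, List.tail_cons]
      rw [if_neg (by simp)]
      exact (List.filter_eq_self.mpr (fun y hy => by
        simp only [decide_eq_true_eq]
        intro hcon; exact hant (hcon ▸ hy))).symm
    | succ j =>
      have hjt : j < t.length := by simpa using hj
      simp only [List.getElem_cons_succ] at hoi
      have hane : a ≠ oi := by
        intro hcon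
        exact hant (hcon ▸ hoi ▸ List.getElem_mem hjt)
      simp only [List.eraseIdx_cons_succ, List.filter_cons]
      rw [if_pos (by simpa using hane), ih j hndt hjt hoi]

theorem pvIndex?_take (m : Char) : ∀ (l : List Char) (t : Nat), m ∈ l.take t →
    PySem.List.index? (l.take t) m = PySem.List.index? l m := by
  intro l
  induction l with
  | nil => intro t hm; simp at hm
  | cons a l ih =>
    intro t hm
    cases t with
    | zero => simp at hm
    | succ t =>
      simp only [List.take_succ_cons] at hm ⊢
      by_cases hma : a = m
      · subst hma
        rw [PySem.List.index?_cons_self, PySem.List.index?_cons_self]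
      · rcases List.mem_cons.mp hm with h | h
        · exact absurd h.symm hma
        · rw [PySem.List.index?_cons_of_ne _ hma, PySem.List.index?_cons_of_ne _ hma, ih t h]

-- ---- the full loop invariant ----
def pvInv (cs : List Char) (avail : List Int) (st : PvStA) : Prop :=
  avail.Pairwise (· < ·) ∧
  (∀ i ∈ avail, 0 ≤ i ∧ i < (cs.length : Int)) ∧
  pvBitInv cs.length (pvAFn avail) st.bit ∧
  st.dio.length = 10 ∧
  (∀ d : Int, 0 ≤ d → d < 10 →
      PySem.List.pyGetD st.dio d [] = avail.filter (fun i => pvCharAt cs i = pvDigitChar d)) ∧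
  st.picked.length = cs.length ∧
  (∀ i : Nat, i < cs.length → (st.picked.getD i false = false ↔ (i : Int) ∈ avail)) ∧
  st.res.length + avail.length = cs.length

theorem pvScan_empty (cs : List Char) (st : PvStA) (ds : List Int)
    (hds : ∀ d ∈ ds, 0 ≤ d ∧ d < 10)
    (hInv : pvInv cs [] st) : pvScanA cs.length ds st = st := by
  induction ds with
  | nil => rfl
  | cons d ds ih =>
    obtain ⟨hd0, hd10⟩ := hds d List.mem_cons_self
    have hdio := hInv.2.2.2.2.1
    have hbucket : PySem.List.pyGetD st.dio d [] = [] := by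
      rw [hdio d hd0 hd10]; rfl
    simp only [pvScanA, hbucket]
    exact ih (fun d' hd' => hds d' (List.mem_cons_of_mem _ hd'))

-- with a negative budget no digit is affordable: the scan is the identity
theorem pvScan_negk (cs : List Char) (avail : List Int) (st : PvStA) (ds : List Int)
    (hds : ∀ d ∈ ds, 0 ≤ d ∧ d < 10)
    (hInv : pvInv cs avail st) (hk : st.k < 0) : pvScanA cs.length ds st = st := by
  obtain ⟨hsorted, hbnd, hbit, hdlen, hdio, hplen, hpick, hcnt⟩ := hInv
  induction ds with
  | nil => rfl
  | cons d ds ih =>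
    obtain ⟨hd0, hd10⟩ := hds d List.mem_cons_self
    cases hbucket : PySem.List.pyGetD st.dio d [] with
    | nil =>
      simp only [pvScanA, hbucket]
      exact ih (fun d' hd' => hds d' (List.mem_cons_of_mem _ hd'))
    | cons oi rest =>
      have hoi_mem : oi ∈ avail := by
        have h1 := hdio d hd0 hd10
        rw [h1] at hbucket
        exact List.mem_of_mem_filter (hbucket ▸ List.mem_cons_self)
      have hcost := pvQuery_count cs.length avail st.bit hbit (pvNodup _ hsorted)
        (fun i hi => (hbnd i hi).1) oi (hbnd oi hoi_mem).1 (le_of_lt (hbnd oi hoi_mem).2)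
      simp only [pvScanA, hbucket]
      rw [if_neg (by rw [hcost]; omega)]
      exact ih (fun d' hd' => hds d' (List.mem_cons_of_mem _ hd'))

theorem pvLoopA_fix (n : Nat) (fuel : Nat) (st : PvStA)
    (hfix : pvScanA n (PySem.List.pyRange 0 10 1) st = st) : pvLoopA n fuel st = st := by
  induction fuel with
  | zero => rfl
  | succ f ih =>
    simp only [pvLoopA]
    by_cases h : st.k = 0
    · rw [if_pos h]
    · rw [if_neg h, hfix, ih]

theorem pvLoopB_step (fuel : Nat) (k : Int) (digits res : List Char) (m : Char) (j : Nat)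
    (cr : Char × List Char)
    (hc : 0 < k ∧ digits ≠ [])
    (hm : PySem.List.min? (PySem.List.slice digits none (some (k+1))) (fun c => c) = some m)
    (hj : PySem.List.index? (PySem.List.slice digits none (some (k+1))) m = some j)
    (hp : PySem.List.pop? digits (j : Int) = some cr) :
    pvLoopB (fuel+1) k digits res = pvLoopB fuel (k - (j : Int)) cr.2 (res ++ [cr.1]) := by
  simp only [pvLoopB, if_pos hc, hm]
  split
  · rename_i h; cases hj.symm.trans h
  · rename_i j' h
    injection hj.symm.trans h with hjj
    subst hjj
    split
    · rename_i h2; cases hp.symm.trans h2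
    · rename_i cr' h2
      injection hp.symm.trans h2 with hcc
      subst hcc
      rfl

theorem pvLoopBI_step (fuel : Nat) (k : Int) (digits res : List Int) (m : Int) (j : Nat)
    (cr : Int × List Int)
    (hc : 0 < k ∧ digits ≠ [])
    (hm : PySem.List.min? (PySem.List.slice digits none (some (k+1))) (fun c => c) = some m)
    (hj : PySem.List.index? (PySem.List.slice digits none (some (k+1))) m = some j)
    (hp : PySem.List.pop? digits (j : Int) = some cr) :
    pvLoopBI (fuel+1) k digits res = pvLoopBI fuel (k - (j : Int)) cr.2 (res ++ [cr.1]) := by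
  simp only [pvLoopBI, if_pos hc, hm]
  split
  · rename_i h; cases hj.symm.trans h
  · rename_i j' h
    injection hj.symm.trans h with hjj
    subst hjj
    split
    · rename_i h2; cases hp.symm.trans h2
    · rename_i cr' h2
      injection hp.symm.trans h2 with hcc
      subst hcc
      rfl

theorem pvDigitChar_toNat (d : Int) (h0 : 0 ≤ d) (h10 : d < 10) :
    (pvDigitChar d).toNat = 48 + d.toNat := by
  obtain ⟨dn, rfl⟩ : ∃ dn : Nat, d = (dn : Int) := ⟨d.toNat, by omega⟩
  have hdn : dn < 10 := by omega
  interval_cases dn <;> decide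

theorem pvBitInv_congr (n : Nat) (f g : Nat → Int) (tree : List Int)
    (hfg : ∀ x, f x = g x) (h : pvBitInv n f tree) : pvBitInv n g tree :=
  ⟨h.1, fun j h1 h2 => by rw [h.2 j h1 h2]; exact Finset.sum_congr rfl (fun x _ => hfg x)⟩

theorem pvCharAt_facts (cs : List Char) (hPre : ∀ c ∈ cs, 48 ≤ c.toNat ∧ c.toNat ≤ 57)
    (i : Int) (h0 : 0 ≤ i) (h1 : i < (cs.length : Int)) :
    pvCharAt cs i ∈ cs ∧ 48 ≤ (pvCharAt cs i).toNat ∧ (pvCharAt cs i).toNat ≤ 57 := by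
  obtain ⟨m, rfl⟩ : ∃ m : Nat, i = (m : Int) := ⟨i.toNat, by omega⟩
  have hm : m < cs.length := by omega
  unfold pvCharAt
  rw [PySem.List.pyGetD_natCast, List.getD_eq_getElem?_getD, List.getElem?_eq_getElem hm]
  have hmem : cs[m] ∈ cs := List.getElem_mem hm
  exact ⟨hmem, (hPre _ hmem).1, (hPre _ hmem).2⟩

theorem pvFilter_head_erase : ∀ (l : List Int) (j : Nat) (hj : j < l.length) (p : Int → Bool),
    p l[j] = true → (∀ q (hq : q < j), p (l[q]'(by omega)) = false) →
    l.filter p = l[j] :: (l.eraseIdx j).filter p := by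
  intro l
  induction l with
  | nil => intro j hj; simp at hj
  | cons a t ih =>
    intro j hj p hpj hpq
    cases j with
    | zero =>
      simp only [List.getElem_cons_zero] at hpj ⊢
      rw [List.filter_cons, if_pos hpj, List.eraseIdx_zero, List.tail_cons]
    | succ j =>
      have hjt : j < t.length := by simpa using hj
      have hpa : p a = false := hpq 0 (Nat.succ_pos j)
      simp only [List.getElem_cons_succ] at hpj ⊢
      rw [List.filter_cons, if_neg (by simp [hpa]), List.eraseIdx_cons_succ,
          List.filter_cons, if_neg (by simp [hpa])]
      exact ih j hjt p hpj (fun q hq => hpq (q+1) (by omega))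

-- one pick preserves the full invariant
theorem pvInv_step (cs : List Char) (avail : List Int) (st : PvStA)
    (hPre : ∀ c ∈ cs, 48 ≤ c.toNat ∧ c.toNat ≤ 57)
    (hInv : pvInv cs avail st) (j : Nat) (hj : j < avail.length) (m : Char)
    (hcharj : pvCharAt cs (avail[j]'hj) = m)
    (hleft : ∀ q (hq : q < j), pvCharAt cs (avail[q]'(by omega)) ≠ m) :
    pvInv cs (avail.eraseIdx j)
      { k := st.k - (j : Int),
        dio := PySem.List.pySetD st.dio (pvDigit m) ((st.dio.getD (pvDigit m).toNat []).drop 1),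
        bit := fenUpdate ((cs.length : Int)+1) st.bit (avail[j]'hj) (-1),
        picked := PySem.List.pySetD st.picked (avail[j]'hj) true,
        res := st.res ++ [m] } := by
  obtain ⟨hsorted, hbnd, hbit, hdlen, hdio, hplen, hpick, hcnt⟩ := hInv
  have hnd : avail.Nodup := pvNodup _ hsorted
  have hoib := hbnd (avail[j]'hj) (List.getElem_mem hj)
  have havail' : avail.eraseIdx j = avail.filter (fun y => decide (y ≠ avail[j]'hj)) :=
    pvEraseIdx_filter _ avail j hnd hj rfl
  have hmfacts := pvCharAt_facts cs hPre (avail[j]'hj) hoib.1 hoib.2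
  rw [hcharj] at hmfacts
  obtain ⟨hd0, hd10, hdchar, hdtoChars, hdval⟩ := pvDigit_facts m hmfacts.2.1 hmfacts.2.2
  have hdmnat : pvDigit m = ((pvDigit m).toNat : Int) := by omega
  have hpm : PySem.List.pyGetD st.dio (pvDigit m) []
      = avail.filter (fun i => decide (pvCharAt cs i = pvDigitChar (pvDigit m))) :=
    hdio (pvDigit m) hd0 hd10
  have hfhead : avail.filter (fun i => decide (pvCharAt cs i = pvDigitChar (pvDigit m)))
      = (avail[j]'hj) :: (avail.eraseIdx j).filter (fun i => decide (pvCharAt cs i = pvDigitChar (pvDigit m))) := by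
    apply pvFilter_head_erase avail j hj
    · simp only [decide_eq_true_eq]; rw [hdchar]; exact hcharj
    · intro q hq
      simp only [decide_eq_false_iff_not]
      rw [hdchar]
      exact hleft q hq
  refine ⟨?_, ?_, ?_, ?_, ?_, ?_, ?_, ?_⟩
  · exact List.Pairwise.sublist (List.eraseIdx_sublist avail j) hsorted
  · exact fun i hi => hbnd i ((List.eraseIdx_sublist avail j).subset hi)
  · -- Fenwick invariant
    have hupd := pvBitInv_update cs.length (pvAFn avail) st.bit ((avail[j]'hj).toNat + 1) (-1)
      hbit (by omega) (by omega)
    have harg : (((avail[j]'hj).toNat + 1 : Nat) : Int) - 1 = avail[j]'hj := by omega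
    rw [harg] at hupd
    apply pvBitInv_congr _ _ _ _ _ hupd
    intro x
    simp only [pvAFn]
    rw [havail']
    by_cases hx : x = (avail[j]'hj).toNat + 1
    · have hxa : (x : Int) - 1 = avail[j]'hj := by omega
      rw [if_pos hx, hxa, if_pos (List.getElem_mem hj)]
      rw [if_neg (by
        intro hmem
        have := List.of_mem_filter hmem
        simp at this)]
      ring
    · have hxa : (x : Int) - 1 ≠ avail[j]'hj := by omega
      rw [if_neg hx]
      have hiff : ((x : Int) - 1 ∈ avail.filter (fun y => decide (y ≠ avail[j]'hj)))
          ↔ ((x : Int) - 1 ∈ avail) := by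
        constructor
        · exact fun h => List.mem_of_mem_filter h
        · intro h; exact List.mem_filter.mpr ⟨h, by simpa using hxa⟩
      by_cases hmem : (x : Int) - 1 ∈ avail
      · rw [if_pos hmem, if_pos (hiff.mpr hmem)]; ring
      · rw [if_neg hmem, if_neg (fun h => hmem (hiff.mp h))]; ring
  · simp only [PySem.List.length_pySetD]; exact hdlen
  · -- buckets
    intro d hdl hdr
    have hdnat : d = (d.toNat : Int) := by omega
    have hdioLen : (pvDigit m).toNat < st.dio.length := by omega
    rw [show PySem.List.pySetD st.dio (pvDigit m) ((st.dio.getD (pvDigit m).toNat []).drop 1)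
        = PySem.List.pySetD st.dio (((pvDigit m).toNat : Nat) : Int) ((st.dio.getD (pvDigit m).toNat []).drop 1) from by rw [← hdmnat]]
    rw [hdnat, PySem.List.pyGetD_pySetD_natCast _ _ _ _ _ hdioLen]
    have hgg : st.dio.getD (pvDigit m).toNat [] = PySem.List.pyGetD st.dio (pvDigit m) [] := by
      conv_rhs => rw [hdmnat]
      rw [PySem.List.pyGetD_natCast]
    by_cases hdd : d.toNat = (pvDigit m).toNat
    · rw [if_pos hdd]
      have hdeq : d = pvDigit m := by omega
      rw [hdeq, hgg, hpm, hfhead, List.drop_one, List.tail_cons, ← hdmnat]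
    · rw [if_neg hdd]
      rw [← hdnat, hdio d hdl hdr, havail']
      rw [List.filter_filter]
      apply List.filter_congr
      intro y hy
      cases hcy : decide (pvCharAt cs y = pvDigitChar d)
      · simp
      · simp only [Bool.and_true, Bool.true_and]
        simp only [decide_eq_true_eq] at hcy
        have hyne : y ≠ avail[j]'hj := by
          intro hcon
          rw [hcon, hcharj] at hcy
          have h1 := pvDigitChar_toNat d (by omega) hdr
          have h2 := pvDigitChar_toNat (pvDigit m) hd0 hd10
          rw [← hdchar] at hcy
          have : (pvDigitChar (pvDigit m)).toNat = (pvDigitChar d).toNat := by rw [hcy]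
          omega
        simp [hyne]
  · simp only [PySem.List.length_pySetD]; exact hplen
  · -- picked
    intro i hi
    rw [PySem.List.pySetD_of_nonneg _ _ hoib.1,
        getD_set' st.picked (avail[j]'hj).toNat i true false (by omega)]
    by_cases hieq : i = (avail[j]'hj).toNat
    · rw [if_pos hieq]
      constructor
      · intro h; cases h
      · intro hmem
        exfalso
        rw [havail'] at hmem
        have := List.of_mem_filter hmem
        rw [hieq] at this
        simp at this
        omega
    · rw [if_neg hieq, havail']
      have hine : (i : Int) ≠ avail[j]'hj := by omega
      rw [show ((i : Int) ∈ avail.filter (fun y => decide (y ≠ avail[j]'hj)))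
          = ((i : Int) ∈ avail) from propext ⟨fun h => List.mem_of_mem_filter h,
            fun h => List.mem_filter.mpr ⟨h, by simpa using hine⟩⟩]
      exact hpick i hi
  · simp only [List.length_append, List.length_cons, List.length_nil]
    have hlen' : (avail.eraseIdx j).length = avail.length - 1 := by
      simp [List.length_eraseIdx, hj]
    omega
-- the inner for-loop over digit values 0..9, started at d0, performs exactly the pick
-- of the leftmost minimal character of the window
theorem pvScanAux (cs : List Char) (avail : List Int) (st : PvStA)
    (hPre : ∀ c ∈ cs, 48 ≤ c.toNat ∧ c.toNat ≤ 57)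
    (hInv : pvInv cs avail st) (hk : 1 ≤ st.k)
    (m : Char) (j : Nat) (hj : j < avail.length)
    (hrj : pvCharAt cs (avail[j]'hj) = m)
    (hleft : ∀ q (hq : q < j), pvCharAt cs (avail[q]'(by omega)) ≠ m)
    (hmin : ∀ y ∈ (pvRem cs avail).take (st.k+1).toNat, m ≤ y)
    (hjk : (j : Int) ≤ st.k) :
    ∀ (dcnt d0 : Nat), d0 + dcnt = 10 → (d0 : Int) ≤ pvDigit m →
    pvScanA cs.length (PySem.List.pyRange (d0 : Int) 10 1) st =
      { k := st.k - (j : Int),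
        dio := PySem.List.pySetD st.dio (pvDigit m) ((st.dio.getD (pvDigit m).toNat []).drop 1),
        bit := fenUpdate ((cs.length : Int)+1) st.bit (avail[j]'hj) (-1),
        picked := PySem.List.pySetD st.picked (avail[j]'hj) true,
        res := st.res ++ [m] } := by
  obtain ⟨hsorted, hbnd, hbit, hdlen, hdio, hplen, hpick, hcnt⟩ := hInv
  have hnd := pvNodup _ hsorted
  have hoib := hbnd _ (List.getElem_mem hj)
  have hmfacts := pvCharAt_facts cs hPre (avail[j]'hj) hoib.1 hoib.2
  rw [hrj] at hmfacts
  obtain ⟨hgd0, hgd10, hdchar, hdtoChars, hdval⟩ := pvDigit_facts m hmfacts.2.1 hmfacts.2.2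
  have hremlen : (pvRem cs avail).length = avail.length := List.length_map ..
  intro dcnt
  induction dcnt with
  | zero => intro d0 hsum hle; exfalso; omega
  | succ dcnt ih =>
    intro d0 hsum hle
    have hd0lt : (d0 : Int) < 10 := by omega
    rw [PySem.List.pyRange_one_cons hd0lt]
    have hfilt := hdio (d0 : Int) (by omega) hd0lt
    cases hbucketP : PySem.List.pyGetD st.dio (d0 : Int) [] with
    | nil =>
      simp only [pvScanA, hbucketP]
      have harg : ((d0 : Int) + 1) = ((d0+1 : Nat) : Int) := by push_cast; ring
      have hne10 : (d0 : Int) ≠ pvDigit m := by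
        intro hcon
        have hmemf : (avail[j]'hj) ∈ avail.filter
            (fun i => decide (pvCharAt cs i = pvDigitChar (d0 : Int))) :=
          List.mem_filter.mpr ⟨List.getElem_mem hj, by rw [hcon, hdchar]; simp [hrj]⟩
        rw [← hfilt, hbucketP] at hmemf
        simp at hmemf
      rw [harg]
      exact ih (d0+1) (by omega) (by omega)
    | cons oi' rest' =>
      simp only [pvScanA, hbucketP]
      have hbf : avail.filter (fun i => decide (pvCharAt cs i = pvDigitChar (d0 : Int)))
          = oi' :: rest' := by rw [← hfilt]; exact hbucketP
      have hoi'mem : oi' ∈ avail :=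
        List.mem_of_mem_filter (by rw [hbf]; exact List.mem_cons_self)
      have hoi'char : pvCharAt cs oi' = pvDigitChar (d0 : Int) := by
        have := List.of_mem_filter (p := fun i => decide (pvCharAt cs i = pvDigitChar (d0 : Int)))
          (by rw [hbf]; exact List.mem_cons_self)
        simpa using this
      obtain ⟨q, hq, hqoi⟩ := List.mem_iff_getElem.mp hoi'mem
      have hcost := pvQuery_count cs.length avail st.bit hbit hnd
        (fun i hi => (hbnd i hi).1) oi' (hbnd _ hoi'mem).1 (le_of_lt (hbnd _ hoi'mem).2)
      by_cases hdm : (d0 : Int) = pvDigit m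
      · -- this digit is the window minimum: the branch fires
        have hjmem : (avail[j]'hj) ∈ oi' :: rest' := by
          rw [← hbf]
          exact List.mem_filter.mpr ⟨List.getElem_mem hj, by rw [hdm, hdchar]; simp [hrj]⟩
        have hqm : pvCharAt cs (avail[q]'hq) = m := by rw [hqoi, hoi'char, hdm, hdchar]
        have hqj : j ≤ q := by
          by_contra hcon
          exact hleft q (by omega) hqm
        have haji : avail[j]'hj ≤ oi' := by
          rcases Nat.eq_or_lt_of_le hqj with heq | hlt
          · rw [← hqoi]; subst heq; exact le_refl _
          · rw [← hqoi]
            exact le_of_lt (List.pairwise_iff_getElem.mp hsorted j q hj hq hlt)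
        have hoiaj : oi' ≤ avail[j]'hj := by
          rcases List.mem_cons.mp hjmem with heq | hmemr
          · exact le_of_eq heq.symm
          · have hpw : (oi' :: rest').Pairwise (· < ·) := hbf ▸ (hsorted.filter _)
            exact le_of_lt ((List.pairwise_cons.mp hpw).1 _ hmemr)
        have hoieq : oi' = avail[j]'hj := le_antisymm hoiaj haji
        have hcostj : fenQuery st.bit (oi' - 1) = (j : Int) := by
          rw [hcost, pvPos_count oi' avail hsorted j hj hoieq.symm]
        rw [hcostj, if_pos hjk]
        have hbucketd : st.dio.getD (pvDigit m).toNat [] = oi' :: rest' := by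
          rw [← PySem.List.pyGetD_natCast st.dio (pvDigit m).toNat ([] : List Int)]
          rw [show (((pvDigit m).toNat : Nat) : Int) = (d0 : Int) from by omega]
          exact hbucketP
        rw [hoieq, hdm, hdtoChars, hbucketd, List.drop_one, List.tail_cons]
      · -- this digit only occurs outside the window (or not at all): skipped
        have hd0ltm : (d0 : Int) < pvDigit m := lt_of_le_of_ne hle hdm
        have hposq := pvPos_count oi' avail hsorted q hq hqoi
        have hql : ¬ (q < (st.k+1).toNat) := by
          intro hqw
          have hqrem : q < (pvRem cs avail).length := by omega
          have h1 : q < ((pvRem cs avail).take (st.k+1).toNat).length := by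
            rw [List.length_take]; omega
          have h2 : ((pvRem cs avail).take (st.k+1).toNat)[q]'h1 = (pvRem cs avail)[q]'hqrem :=
            List.getElem_take ..
          have hmle := hmin _ (h2 ▸ List.getElem_mem h1)
          have hrq : (pvRem cs avail)[q]'hqrem = pvCharAt cs (avail[q]'hq) := List.getElem_map ..
          rw [hrq, hqoi, hoi'char] at hmle
          rw [pvChar_le_iff] at hmle
          have ht1 := pvDigitChar_toNat (d0 : Int) (by omega) hd0lt
          omega
        have hcostbig : ¬ (fenQuery st.bit (oi' - 1) ≤ st.k) := by
          rw [hcost, hposq]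
          omega
        rw [if_neg hcostbig]
        have harg : ((d0 : Int) + 1) = ((d0+1 : Nat) : Int) := by push_cast; ring
        rw [harg]
        exact ih (d0+1) (by omega) (by omega)

-- the inner scan picks exactly B's choice: the leftmost minimal digit of the window
theorem pvScan_pick (cs : List Char) (avail : List Int) (st : PvStA)
    (hPre : ∀ c ∈ cs, 48 ≤ c.toNat ∧ c.toNat ≤ 57)
    (hInv : pvInv cs avail st) (hk : 1 ≤ st.k) (hne : avail ≠ []) :
    ∃ m j,
      PySem.List.min? (PySem.List.slice (pvRem cs avail) none (some (st.k+1))) (fun c => c) = some m ∧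
      PySem.List.index? (PySem.List.slice (pvRem cs avail) none (some (st.k+1))) m = some j ∧
      PySem.List.pop? (pvRem cs avail) (j : Int) = some (m, pvRem cs (avail.eraseIdx j)) ∧
      ∃ (hja : j < avail.length),
      pvScanA cs.length (PySem.List.pyRange 0 10 1) st =
        { k := st.k - (j : Int),
          dio := PySem.List.pySetD st.dio (pvDigit m) ((st.dio.getD (pvDigit m).toNat []).drop 1),
          bit := fenUpdate ((cs.length : Int)+1) st.bit (avail[j]'hja) (-1),
          picked := PySem.List.pySetD st.picked (avail[j]'hja) true,
          res := st.res ++ [m] } ∧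
      pvInv cs (avail.eraseIdx j)
        (pvScanA cs.length (PySem.List.pyRange 0 10 1) st) ∧
      (j : Int) ≤ st.k := by
  have hwin : PySem.List.slice (pvRem cs avail) none (some (st.k+1))
      = (pvRem cs avail).take (st.k+1).toNat := PySem.List.slice_to _ (by omega)
  have hremlen : (pvRem cs avail).length = avail.length := List.length_map ..
  have hremne : 0 < (pvRem cs avail).length := by
    rw [hremlen]
    cases avail with
    | nil => exact absurd rfl hne
    | cons a t => simp
  have hwne : (pvRem cs avail).take (st.k+1).toNat ≠ [] := by
    apply List.ne_nil_of_length_pos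
    rw [List.length_take]
    omega
  rw [hwin]
  cases hmin? : PySem.List.min? ((pvRem cs avail).take (st.k+1).toNat) (fun c => c) with
  | none => exact absurd ((PySem.List.min?_eq_none_iff _ _).mp hmin?) hwne
  | some m =>
  have hm_mem : m ∈ (pvRem cs avail).take (st.k+1).toNat := PySem.List.min?_mem hmin?
  have hm_rem : m ∈ pvRem cs avail := (List.take_sublist _ _).subset hm_mem
  have hsome : (PySem.List.index? (pvRem cs avail) m).isSome = true :=
    (PySem.List.index?_isSome_iff _ _).mpr hm_rem
  obtain ⟨j, hidx⟩ := Option.isSome_iff_exists.mp hsome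
  obtain ⟨hjlen', hrm, hlm⟩ := PySem.List.getElem_of_index?_eq_some hidx
  have hidxwin : PySem.List.index? ((pvRem cs avail).take (st.k+1).toNat) m = some j :=
    (pvIndex?_take m (pvRem cs avail) _ hm_mem).trans hidx
  obtain ⟨hjw, _, _⟩ := PySem.List.getElem_of_index?_eq_some hidxwin
  have hjk : (j : Int) ≤ st.k := by
    rw [List.length_take] at hjw
    omega
  have hja : j < avail.length := by omega
  have hcharj : pvCharAt cs (avail[j]'hja) = m := by
    rw [← hrm]
    exact (List.getElem_map ..).symm
  have hleftA : ∀ q (hq : q < j), pvCharAt cs (avail[q]'(by omega)) ≠ m := by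
    intro q hq hcon
    apply hlm q (by omega)
    rw [← hcon]
    exact List.getElem_map ..
  have hoib := (hInv.2.1) _ (List.getElem_mem hja)
  have hmfacts := pvCharAt_facts cs hPre (avail[j]'hja) hoib.1 hoib.2
  rw [hcharj] at hmfacts
  obtain ⟨hgd0, hgd10, hdchar, hdtoChars, hdval⟩ := pvDigit_facts m hmfacts.2.1 hmfacts.2.2
  have hminle : ∀ y ∈ (pvRem cs avail).take (st.k+1).toNat, m ≤ y := by
    intro y hy
    exact PySem.List.min?_isMin hmin? y hy
  have hpop : PySem.List.pop? (pvRem cs avail) (j : Int)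
      = some (m, pvRem cs (avail.eraseIdx j)) := by
    rw [PySem.List.pop?_natCast _ _ hjlen', hrm]
    congr 1
    rw [Prod.mk.injEq]
    refine ⟨rfl, ?_⟩
    simp only [pvRem]
    exact List.eraseIdx_map ..
  have hscan := pvScanAux cs avail st hPre hInv hk m j hja hcharj hleftA hminle hjk 10 0
    (by norm_num) (by simpa using hgd0)
  have hscan' : pvScanA cs.length (PySem.List.pyRange 0 10 1) st =
      { k := st.k - (j : Int),
        dio := PySem.List.pySetD st.dio (pvDigit m) ((st.dio.getD (pvDigit m).toNat []).drop 1),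
        bit := fenUpdate ((cs.length : Int)+1) st.bit (avail[j]'hja) (-1),
        picked := PySem.List.pySetD st.picked (avail[j]'hja) true,
        res := st.res ++ [m] } := by
    simpa using hscan
  refine ⟨m, j, rfl, hidxwin, hpop, hja, hscan', ?_, hjk⟩
  rw [hscan']
  exact pvInv_step cs avail st hPre hInv j hja m hcharj hleftA

theorem pvLoopB_acc (fuel : Nat) (k : Int) (ds res : List Char) :
    pvLoopB fuel k ds res = res ++ pvLoopB fuel k ds [] := by
  induction fuel generalizing k ds res with
  | zero => simp [pvLoopB]
  | succ fuel ih =>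
    simp only [pvLoopB]
    by_cases hc : 0 < k ∧ ds ≠ []
    · simp only [if_pos hc]
      split
      · rfl
      · split
        · rfl
        · split
          · rfl
          · rw [ih, ih]; simp
            conv_rhs => rw [ih]
            simp
    · simp only [if_neg hc]; simp

theorem pvRange_filter (avail : List Int) (n : Nat) (hs : avail.Pairwise (· < ·))
    (hb : ∀ i ∈ avail, 0 ≤ i ∧ i < (n : Int)) :
    (PySem.List.pyRange 0 (n : Int) 1).filter (fun i => decide (i ∈ avail)) = avail := by
  have hndr := PySem.List.nodup_pyRange_one (a := 0) (b := (n : Int))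
  have hndf : ((PySem.List.pyRange 0 (n : Int) 1).filter (fun i => decide (i ∈ avail))).Nodup :=
    hndr.filter _
  have hnda : avail.Nodup := pvNodup _ hs
  have hperm : ((PySem.List.pyRange 0 (n : Int) 1).filter (fun i => decide (i ∈ avail))).Perm avail := by
    rw [List.perm_ext_iff_of_nodup hndf hnda]
    intro x
    simp only [List.mem_filter, PySem.List.mem_pyRange_one, decide_eq_true_eq]
    constructor
    · rintro ⟨_, hx⟩; exact hx
    · intro hx; exact ⟨⟨(hb x hx).1, (hb x hx).2⟩, hx⟩
  refine List.eq_of_perm_of_sorted (fun a b _ _ hab hba => le_antisymm hab hba) ?_ ?_ hperm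
  · exact ((PySem.List.pairwise_lt_pyRange_one (a := 0) (b := (n:Int))).filter _).imp (fun h => le_of_lt h)
  · exact hs.imp (fun h => le_of_lt h)

theorem pvFill (cs : List Char) (avail : List Int) (picked : List Bool) (res : List Char)
    (hs : avail.Pairwise (· < ·)) (hb : ∀ i ∈ avail, 0 ≤ i ∧ i < (cs.length : Int))
    (hpick : ∀ i : Nat, i < cs.length → (picked.getD i false = false ↔ (i : Int) ∈ avail)) :
    (PySem.List.pyRange 0 (cs.length : Int) 1).foldl
      (fun r i => if PySem.List.pyGetD picked i false then r
                  else r ++ [PySem.List.pyGetD cs i ' ']) res = res ++ pvRem cs avail := by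
  rw [show (fun (r : List Char) (i : Int) =>
        if PySem.List.pyGetD picked i false then r else r ++ [PySem.List.pyGetD cs i ' '])
      = (fun (r : List Char) (i : Int) =>
        if (!(PySem.List.pyGetD picked i false)) = true then r ++ [PySem.List.pyGetD cs i ' '] else r) from by
    funext r i
    cases h : PySem.List.pyGetD picked i false <;> simp [h]]
  rw [PySem.List.foldl_append_if (fun i => !(PySem.List.pyGetD picked i false))
        (fun i => PySem.List.pyGetD cs i ' ') _ res]
  have hfilter : (PySem.List.pyRange 0 (cs.length : Int) 1).filter
      (fun i => !(PySem.List.pyGetD picked i false))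
      = (PySem.List.pyRange 0 (cs.length : Int) 1).filter (fun i => decide (i ∈ avail)) := by
    apply List.filter_congr
    intro i hi
    rw [PySem.List.mem_pyRange_one] at hi
    obtain ⟨mm, rfl⟩ : ∃ mm : Nat, i = (mm : Int) := ⟨i.toNat, by omega⟩
    have hm : mm < cs.length := by omega
    rw [PySem.List.pyGetD_natCast]
    have hiff := hpick mm hm
    cases hpb : picked.getD mm false
    · simp only [hpb, Bool.not_false, decide_eq_true_eq]
      exact (decide_eq_true (hiff.mp hpb)).symm ▸ rfl
    · simp only [hpb, Bool.not_true]
      have hnm : ¬ ((mm : Int) ∈ avail) := fun hmem => by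
        have hfalse := hiff.mpr hmem; rw [hpb] at hfalse; cases hfalse
      simp [hnm]
  rw [hfilter, pvRange_filter avail cs.length hs hb]
  rfl

def pvFinish (cs : List Char) (st : PvStA) : List Char :=
  if st.res.length < cs.length then
    (PySem.List.pyRange 0 (cs.length : Int) 1).foldl
      (fun r i => if PySem.List.pyGetD st.picked i false then r
                  else r ++ [PySem.List.pyGetD cs i ' ']) st.res
  else st.res

theorem pvLoop_main (cs : List Char) (fuel : Nat) (avail : List Int) (st : PvStA)
    (hPre : ∀ c ∈ cs, 48 ≤ c.toNat ∧ c.toNat ≤ 57)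
    (hInv : pvInv cs avail st) (hk : 0 ≤ st.k) (hfuel : avail.length ≤ fuel) :
    pvFinish cs (pvLoopA cs.length fuel st)
      = st.res ++ pvLoopB (pvRem cs avail).length st.k (pvRem cs avail) [] := by
  induction fuel generalizing avail st with
  | zero =>
    have hav : avail = [] := List.length_eq_zero_iff.mp (by omega)
    subst hav
    have hres : st.res.length = cs.length := by
      have := hInv.2.2.2.2.2.2.2
      simpa using this
    show pvFinish cs st = _
    unfold pvFinish
    rw [if_neg (by omega)]
    simp [pvRem, pvLoopB]
  | succ f ih =>
    by_cases hk0 : st.k = 0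
    · -- A breaks out of the loop; B's while-condition fails
      simp only [pvLoopA, if_pos hk0]
      obtain ⟨hsorted, hbnd, hbit, hdlen, hdio, hplen, hpick, hcnt⟩ := hInv
      cases havail : avail with
      | nil =>
        subst havail
        unfold pvFinish
        rw [if_neg (by simp at hcnt; omega)]
        simp [pvRem, pvLoopB]
      | cons a t =>
        have hrlen : (pvRem cs avail).length = avail.length := List.length_map ..
        rw [← havail]
        unfold pvFinish
        rw [if_pos (by rw [havail] at hcnt; simp at hcnt; omega)]
        rw [pvFill cs avail st.picked st.res hsorted hbnd hpick]
        congr 1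
        rw [show (pvRem cs avail).length = ((pvRem cs avail).length - 1) + 1 from by
          rw [hrlen, havail]; simp]
        simp only [pvLoopB]
        rw [if_neg (by rw [hk0]; simp), List.nil_append]
    · have hk1 : 1 ≤ st.k := by omega
      by_cases hav : avail = []
      · subst hav
        simp only [pvLoopA, if_neg hk0]
        rw [pvScan_empty cs st _ (fun d hd => by
          rw [PySem.List.mem_pyRange_one] at hd; omega) hInv]
        exact ih [] st hInv hk (by simp)
      · obtain ⟨m, j, hmin, hidx, hpop, hja, hscan, hInv', hjk⟩ :=
          pvScan_pick cs avail st hPre hInv hk1 hav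
        rw [hscan] at hInv'
        simp only [pvLoopA, if_neg hk0]
        rw [hscan]
        have hrlen : (pvRem cs avail).length = avail.length := List.length_map ..
        have hrlen' : (pvRem cs (avail.eraseIdx j)).length + 1 = (pvRem cs avail).length := by
          have := PySem.List.length_of_pop?_eq_some _ hpop
          simpa using this
        have hlenerase : (avail.eraseIdx j).length = avail.length - 1 := by
          simp [List.length_eraseIdx, hja]
        rw [ih (avail.eraseIdx j) _ hInv' (by simp; omega) (by omega)]
        simp only []
        rw [show (pvRem cs avail).length = ((pvRem cs avail).length - 1) + 1 from by omega]
        rw [pvLoopB_step ((pvRem cs avail).length - 1) st.k (pvRem cs avail) []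
            m j (m, pvRem cs (avail.eraseIdx j))
            ⟨by omega, List.ne_nil_of_length_pos (by omega)⟩ hmin hidx hpop]
        rw [pvLoopB_acc]
        rw [show (pvRem cs avail).length - 1 = (pvRem cs (avail.eraseIdx j)).length from by omega]
        simp only [List.nil_append, List.append_assoc]
        congr 1
        conv_rhs => rw [pvLoopB_acc]

-- ---- initialisation ----
theorem pvBitInit (n : Nat) : ∀ (t : Nat), t ≤ n →
    pvBitInv n (pvAFn (PySem.List.pyRange 0 (t : Int) 1))
      ((PySem.List.pyRange 0 (t : Int) 1).foldl
        (fun tr i => fenUpdate ((n : Int)+1) tr i 1) (List.replicate (n+1) 0)) := by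
  intro t
  induction t with
  | zero =>
    intro _
    constructor
    · simp
    · intro j h1 h2
      rw [show PySem.List.pyRange 0 ((0:Nat) : Int) 1 = [] from by
        rw [Nat.cast_zero]; exact PySem.List.pyRange_one_eq_nil (le_refl 0)]
      simp only [List.foldl_nil]
      rw [List.getD_eq_getElem?_getD, List.getElem?_replicate]
      rw [if_pos (by omega)]
      simp [pvAFn]
  | succ t ih =>
    intro ht
    have hih := ih (by omega)
    have hsplit : PySem.List.pyRange 0 ((t+1 : Nat) : Int) 1
        = PySem.List.pyRange 0 (t : Int) 1 ++ [(t : Int)] := by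
      rw [show ((t+1 : Nat) : Int) = (t : Int) + 1 from by push_cast; ring]
      exact PySem.List.pyRange_one_succ_right (by omega)
    rw [hsplit, List.foldl_append, List.foldl_cons, List.foldl_nil]
    have hupd := pvBitInv_update n (pvAFn (PySem.List.pyRange 0 (t : Int) 1)) _ (t+1) 1
      hih (by omega) (by omega)
    have harg : ((t+1 : Nat) : Int) - 1 = (t : Int) := by push_cast; ring
    rw [harg] at hupd
    apply pvBitInv_congr _ _ _ _ _ hupd
    intro x
    simp only [pvAFn, List.mem_append, PySem.List.mem_pyRange_one, List.mem_singleton]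
    split_ifs <;> omega

theorem pvDigit_iff (cs : List Char) (c : Char) (hc : 48 ≤ c.toNat ∧ c.toNat ≤ 57)
    (d : Int) (h0 : 0 ≤ d) (h10 : d < 10) : (pvDigit c = d) ↔ (c = pvDigitChar d) := by
  obtain ⟨hg0, hg10, hchar, _, hval⟩ := pvDigit_facts c hc.1 hc.2
  constructor
  · intro h; rw [← h, hchar]
  · intro h
    have h1 := pvDigitChar_toNat d h0 h10
    rw [← h] at h1
    omega

theorem pvDioStep : ∀ (l : List Char) (start : Int) (dio : List (List Int)),
    dio.length = 10 → (∀ c ∈ l, 48 ≤ c.toNat ∧ c.toNat ≤ 57) →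
    ∀ d : Int, 0 ≤ d → d < 10 →
    PySem.List.pyGetD ((PySem.List.enumerate l start).foldl
        (fun dio p =>
          let dd := pvDigit p.2
          PySem.List.pySetD dio dd (PySem.List.pyGetD dio dd [] ++ [p.1])) dio) d []
      = PySem.List.pyGetD dio d []
        ++ ((PySem.List.enumerate l start).filter (fun p => decide (pvDigit p.2 = d))).map (·.1) := by
  intro l
  induction l with
  | nil => intro start dio hlen hb d h0 h10; simp [PySem.List.enumerate_nil]
  | cons c t ih =>
    intro start dio hlen hb d h0 h10
    obtain ⟨hc0, hc10, hcchar, _, hcval⟩ :=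
      pvDigit_facts c (hb c List.mem_cons_self).1 (hb c List.mem_cons_self).2
    have hbt : ∀ c' ∈ t, 48 ≤ c'.toNat ∧ c'.toNat ≤ 57 :=
      fun c' hc' => hb c' (List.mem_cons_of_mem _ hc')
    rw [PySem.List.enumerate_cons, List.foldl_cons, List.filter_cons]
    simp only []
    have hlen1 : (PySem.List.pySetD dio (pvDigit c)
        (PySem.List.pyGetD dio (pvDigit c) [] ++ [start])).length = 10 := by
      rw [PySem.List.length_pySetD]; exact hlen
    rw [ih (start+1) _ hlen1 hbt d h0 h10]
    have hdn : d = (d.toNat : Int) := by omega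
    have hcn : pvDigit c = ((pvDigit c).toNat : Int) := by omega
    by_cases hcd : pvDigit c = d
    · rw [if_pos (by simp [hcd]), hcd]
      have hgs : PySem.List.pyGetD (PySem.List.pySetD dio d
          (PySem.List.pyGetD dio d [] ++ [start])) d [] =
          PySem.List.pyGetD dio d [] ++ [start] := by
        conv_lhs => rw [hdn]
        rw [PySem.List.pyGetD_pySetD_natCast _ _ _ _ _ (by omega), if_pos rfl, ← hdn]
      rw [hgs]
      simp [List.append_assoc]
    · rw [if_neg (by simp [hcd])]
      have hgs : PySem.List.pyGetD (PySem.List.pySetD dio (pvDigit c)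
          (PySem.List.pyGetD dio (pvDigit c) [] ++ [start])) d [] =
          PySem.List.pyGetD dio d [] := by
        conv_lhs => rw [hdn, hcn]
        rw [PySem.List.pyGetD_pySetD_natCast _ _ _ _ _ (by omega), if_neg (by omega), ← hdn]
      rw [hgs]

theorem pvDioChars : ∀ (cs l : List Char) (s : Int) (d : Int), 0 ≤ d → d < 10 →
    (∀ c ∈ l, 48 ≤ c.toNat ∧ c.toNat ≤ 57) →
    (∀ off : Nat, (hoff : off < l.length) → l[off] = pvCharAt cs (s + off)) →
    ((PySem.List.enumerate l s).filter (fun p => decide (pvDigit p.2 = d))).map (·.1)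
      = (PySem.List.pyRange s (s + l.length) 1).filter
          (fun i => decide (pvCharAt cs i = pvDigitChar d)) := by
  intro cs l
  induction l with
  | nil => intro s d h0 h10 hb hoff; simp [PySem.List.enumerate_nil,
      PySem.List.pyRange_one_eq_nil (by omega : s + (0:Nat) ≤ s)]
  | cons c t ih =>
    intro s d h0 h10 hb hoff
    have hc : c = pvCharAt cs s := by
      have := hoff 0 (by simp)
      simpa using this
    rw [PySem.List.enumerate_cons, List.filter_cons]
    rw [show s + ((c :: t).length : Int) = s + (1 + (t.length : Int)) from by push_cast; simp; ring]
    rw [PySem.List.pyRange_one_cons (by omega), List.filter_cons]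
    have hiff := pvDigit_iff cs c ⟨(hb c List.mem_cons_self).1, (hb c List.mem_cons_self).2⟩ d h0 h10
    have htail : ((PySem.List.enumerate t (s+1)).filter (fun p => decide (pvDigit p.2 = d))).map (·.1)
        = (PySem.List.pyRange (s+1) (s + (1 + (t.length : Int))) 1).filter
            (fun i => decide (pvCharAt cs i = pvDigitChar d)) := by
      rw [show s + (1 + (t.length : Int)) = (s+1) + (t.length : Int) from by ring]
      apply ih (s+1) d h0 h10 (fun c' hc' => hb c' (List.mem_cons_of_mem _ hc'))
      intro off hofft
      have := hoff (off+1) (by simpa using Nat.succ_lt_succ hofft)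
      simp only [List.getElem_cons_succ] at this
      rw [this]
      congr 1
      push_cast
      ring
    by_cases hcd : pvDigit c = d
    · rw [if_pos (by simp [hcd]), if_pos (by
        simp only [decide_eq_true_eq]
        rw [← hc]
        exact hiff.mp hcd)]
      simp only [List.map_cons]
      rw [htail]
    · rw [if_neg (by simp [hcd]), if_neg (by
        simp only [decide_eq_true_eq]
        rw [← hc]
        intro hcon
        exact hcd (hiff.mpr hcon))]
      exact htail

theorem pvDioLength : ∀ (l : List Char) (start : Int) (dio : List (List Int)),
    ((PySem.List.enumerate l start).foldl
      (fun dio p =>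
        let dd := pvDigit p.2
        PySem.List.pySetD dio dd (PySem.List.pyGetD dio dd [] ++ [p.1])) dio).length
    = dio.length := by
  intro l
  induction l with
  | nil => intro start dio; simp [PySem.List.enumerate_nil]
  | cons c t ih =>
    intro start dio
    rw [PySem.List.enumerate_cons, List.foldl_cons]
    rw [ih (start+1) _]
    simp [PySem.List.length_pySetD]

-- the invariant holds for the freshly initialised state
theorem pvInvInit (cs : List Char) (k : Int)
    (hPre : ∀ c ∈ cs, 48 ≤ c.toNat ∧ c.toNat ≤ 57) :
    pvInv cs (PySem.List.pyRange 0 (cs.length : Int) 1)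
      { k := k,
        dio := (PySem.List.enumerate cs 0).foldl
          (fun dio p =>
            let d := pvDigit p.2
            PySem.List.pySetD dio d (PySem.List.pyGetD dio d [] ++ [p.1]))
          (List.replicate 10 []),
        bit := (PySem.List.pyRange 0 (cs.length : Int) 1).foldl
          (fun t i => fenUpdate ((cs.length : Int)+1) t i 1)
          (List.replicate (cs.length+1) 0),
        picked := List.replicate cs.length false,
        res := [] } := by
  refine ⟨?_, ?_, ?_, ?_, ?_, ?_, ?_, ?_⟩
  · exact PySem.List.pairwise_lt_pyRange_one 0 (cs.length : Int)
  · intro i hi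
    rw [PySem.List.mem_pyRange_one] at hi
    exact ⟨hi.1, hi.2⟩
  · exact pvBitInit cs.length cs.length (le_refl _)
  · rw [pvDioLength]
    simp
  · intro d h0 h10
    rw [pvDioStep cs 0 (List.replicate 10 []) (by simp) hPre d h0 h10]
    rw [pvDioChars cs cs 0 d h0 h10 hPre (fun off hoff => by
      unfold pvCharAt
      rw [show (0 : Int) + (off : Int) = ((off : Nat) : Int) from by ring]
      rw [PySem.List.pyGetD_natCast, List.getD_eq_getElem?_getD, List.getElem?_eq_getElem hoff]
      rfl)]
    rw [show PySem.List.pyGetD (List.replicate 10 ([] : List Int)) d [] = [] from by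
      obtain ⟨dn, rfl⟩ : ∃ dn : Nat, d = (dn : Int) := ⟨d.toNat, by omega⟩
      rw [PySem.List.pyGetD_natCast, List.getD_eq_getElem?_getD, List.getElem?_replicate]
      split_ifs <;> rfl]
    rw [List.nil_append, show (0 : Int) + (cs.length : Int) = (cs.length : Int) from by ring]
  · simp
  · intro i hi
    rw [List.getD_eq_getElem?_getD, List.getElem?_replicate, if_pos hi]
    simp only [Option.getD_some]
    constructor
    · intro _
      rw [PySem.List.mem_pyRange_one]
      omega
    · intro _; exact trivial
  · simp only [List.length_nil, Nat.zero_add, PySem.List.length_pyRange_one]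
    omega

-- ---- simulation: B's integer loop computes the digit values of the character loop ----
theorem pvDigit_le_iff (a b : Char) (ha : 48 ≤ a.toNat ∧ a.toNat ≤ 57)
    (hb : 48 ≤ b.toNat ∧ b.toNat ≤ 57) : a ≤ b ↔ pvDigit a ≤ pvDigit b := by
  rw [pvChar_le_iff]
  have h1 := (pvDigit_facts a ha.1 ha.2).2.2.2.2
  have h2 := (pvDigit_facts b hb.1 hb.2).2.2.2.2
  omega

theorem pvDigit_inj (a b : Char) (ha : 48 ≤ a.toNat ∧ a.toNat ≤ 57)
    (hb : 48 ≤ b.toNat ∧ b.toNat ≤ 57) (h : pvDigit a = pvDigit b) : a = b := by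
  have h1 := (pvDigit_facts a ha.1 ha.2).2.2.2.2
  have h2 := (pvDigit_facts b hb.1 hb.2).2.2.2.2
  have ht : a.toNat = b.toNat := by omega
  calc a = Char.ofNat a.toNat := (Char.ofNat_toNat a).symm
    _ = Char.ofNat b.toNat := by rw [ht]
    _ = b := Char.ofNat_toNat b

theorem pvDigit_min (a b : Char) (ha : 48 ≤ a.toNat ∧ a.toNat ≤ 57)
    (hb : 48 ≤ b.toNat ∧ b.toNat ≤ 57) :
    min (pvDigit a) (pvDigit b) = pvDigit (min a b) := by
  rcases le_total a b with h | h
  · rw [min_eq_left h, min_eq_left ((pvDigit_le_iff a b ha hb).mp h)]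
  · rw [min_eq_right h, min_eq_right ((pvDigit_le_iff b a hb ha).mp h)]

theorem pvFoldlMin : ∀ (t : List Char) (x : Char),
    (∀ c ∈ x :: t, 48 ≤ c.toNat ∧ c.toNat ≤ 57) →
    (t.map pvDigit).foldl min (pvDigit x) = pvDigit (t.foldl min x) := by
  intro t
  induction t with
  | nil => intro x _; rfl
  | cons a t ih =>
    intro x h
    simp only [List.map_cons, List.foldl_cons]
    rw [pvDigit_min x a (h x (List.mem_cons_self)) (h a (List.mem_cons_of_mem _ List.mem_cons_self))]
    apply ih (min x a)
    intro c hc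
    rcases List.mem_cons.mp hc with rfl | hct
    · rcases min_choice x a with hm | hm
      · rw [hm]; exact h x List.mem_cons_self
      · rw [hm]; exact h a (List.mem_cons_of_mem _ List.mem_cons_self)
    · exact h c (List.mem_cons_of_mem _ (List.mem_cons_of_mem _ hct))

theorem pvMin?_map (l : List Char) (h : ∀ c ∈ l, 48 ≤ c.toNat ∧ c.toNat ≤ 57) :
    PySem.List.min? (l.map pvDigit) (fun c => c)
      = (PySem.List.min? l (fun c => c)).map pvDigit := by
  cases l with
  | nil =>
    rw [(PySem.List.min?_eq_none_iff _ _).mpr (by simp),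
        (PySem.List.min?_eq_none_iff _ _).mpr rfl]
    rfl
  | cons a t =>
    simp only [List.map_cons]
    rw [PySem.List.min?_id_cons, PySem.List.min?_id_cons]
    simp only [Option.map_some]
    congr 1
    exact pvFoldlMin t a h

theorem pvIndex?_map (l : List Char) (m : Char)
    (hl : ∀ c ∈ l, 48 ≤ c.toNat ∧ c.toNat ≤ 57) (hm : 48 ≤ m.toNat ∧ m.toNat ≤ 57) :
    PySem.List.index? (l.map pvDigit) (pvDigit m) = PySem.List.index? l m := by
  induction l with
  | nil =>
    rw [(PySem.List.index?_eq_none_iff _ _).mpr (by simp),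
        (PySem.List.index?_eq_none_iff _ _).mpr (by simp)]
  | cons a t ih =>
    simp only [List.map_cons]
    by_cases hma : a = m
    · subst hma
      rw [PySem.List.index?_cons_self, PySem.List.index?_cons_self]
    · rw [PySem.List.index?_cons_of_ne _
          (fun hc => hma (pvDigit_inj a m (hl a List.mem_cons_self) hm hc)),
          PySem.List.index?_cons_of_ne _ hma,
          ih (fun c hc => hl c (List.mem_cons_of_mem _ hc))]

theorem pvLoopBI_sim : ∀ (fuel : Nat) (k : Int) (cs res : List Char),
    (∀ c ∈ cs, 48 ≤ c.toNat ∧ c.toNat ≤ 57) → (∀ c ∈ res, 48 ≤ c.toNat ∧ c.toNat ≤ 57) →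
    (pvLoopBI fuel k (cs.map pvDigit) (res.map pvDigit)).flatMap PySem.Int.toChars
      = pvLoopB fuel k cs res := by
  have hflat : ∀ (l : List Char), (∀ c ∈ l, 48 ≤ c.toNat ∧ c.toNat ≤ 57) →
      (l.map pvDigit).flatMap PySem.Int.toChars = l := by
    intro l hl
    induction l with
    | nil => rfl
    | cons a t ih =>
      simp only [List.map_cons, List.flatMap_cons]
      rw [(pvDigit_facts a (hl a List.mem_cons_self).1 (hl a List.mem_cons_self).2).2.2.2.1,
          ih (fun c hc => hl c (List.mem_cons_of_mem _ hc))]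
      rfl
  intro fuel
  induction fuel with
  | zero =>
    intro k cs res hcs hres
    simp only [pvLoopBI, pvLoopB]
    rw [← List.map_append]
    exact hflat _ (fun c hc => by
      rcases List.mem_append.mp hc with h | h
      exacts [hres c h, hcs c h])
  | succ fuel ih =>
    intro k cs res hcs hres
    by_cases hc : 0 < k ∧ cs ≠ []
    · have hc' : 0 < k ∧ cs.map pvDigit ≠ [] := ⟨hc.1, by simp [hc.2]⟩
      -- the window and the three always-some scrutinees
      have hwinC : PySem.List.slice cs none (some (k+1)) = cs.take (k+1).toNat :=
        PySem.List.slice_to _ (by omega)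
      have hwinI : PySem.List.slice (cs.map pvDigit) none (some (k+1))
          = (cs.take (k+1).toNat).map pvDigit := by
        rw [PySem.List.slice_to _ (by omega), List.map_take]
      have hwd : ∀ c ∈ cs.take (k+1).toNat, 48 ≤ c.toNat ∧ c.toNat ≤ 57 :=
        fun c hcw => hcs c ((List.take_sublist _ _).subset hcw)
      have hwne : cs.take (k+1).toNat ≠ [] := by
        apply List.ne_nil_of_length_pos
        rw [List.length_take]
        have : 0 < cs.length := List.length_pos_iff.mpr hc.2
        omega
      cases hmin? : PySem.List.min? (cs.take (k+1).toNat) (fun c => c) with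
      | none => exact absurd ((PySem.List.min?_eq_none_iff _ _).mp hmin?) hwne
      | some m =>
      have hm_mem : m ∈ cs.take (k+1).toNat := PySem.List.min?_mem hmin?
      have hmd : 48 ≤ m.toNat ∧ m.toNat ≤ 57 := hwd m hm_mem
      obtain ⟨j, hidx⟩ := Option.isSome_iff_exists.mp
        ((PySem.List.index?_isSome_iff _ _).mpr hm_mem)
      obtain ⟨hjw, hwm, _⟩ := PySem.List.getElem_of_index?_eq_some hidx
      have hjcs : j < cs.length := by
        rw [List.length_take] at hjw
        omega
      have hpopC : PySem.List.pop? cs (j : Int) = some (cs[j], cs.eraseIdx j) :=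
        PySem.List.pop?_natCast _ _ hjcs
      have hpopI : PySem.List.pop? (cs.map pvDigit) (j : Int)
          = some (pvDigit cs[j], (cs.eraseIdx j).map pvDigit) := by
        rw [PySem.List.pop?_natCast _ _ (by rw [List.length_map]; exact hjcs)]
        congr 1
        rw [Prod.mk.injEq]
        exact ⟨List.getElem_map .., List.eraseIdx_map ..⟩
      have hstepC := pvLoopB_step fuel k cs res m j (cs[j], cs.eraseIdx j) hc
        (by rw [hwinC]; exact hmin?) (by rw [hwinC]; exact hidx) hpopC
      have hstepI := pvLoopBI_step fuel k (cs.map pvDigit) (res.map pvDigit)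
        (pvDigit m) j (pvDigit cs[j], (cs.eraseIdx j).map pvDigit) hc'
        (by rw [hwinI, pvMin?_map _ hwd, hmin?]; rfl)
        (by rw [hwinI, pvIndex?_map _ m hwd hmd]; exact hidx) hpopI
      rw [hstepC, hstepI]
      simp only []
      rw [show (res.map pvDigit) ++ [pvDigit cs[j]] = (res ++ [cs[j]]).map pvDigit from by
        rw [List.map_append]; rfl]
      apply ih
      · exact fun c hcx => hcs c ((List.eraseIdx_sublist cs j).subset hcx)
      · intro c hcx
        rcases List.mem_append.mp hcx with h | h
        · exact hres c h
        · rw [List.mem_singleton.mp h]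
          exact hcs _ (List.getElem_mem hjcs)
    · have hc' : ¬ (0 < k ∧ cs.map pvDigit ≠ []) := by
        intro hcon
        exact hc ⟨hcon.1, fun hnil => hcon.2 (by rw [hnil]; rfl)⟩
      simp only [pvLoopBI, pvLoopB, if_neg hc, if_neg hc']
      rw [← List.map_append]
      exact hflat _ (fun c hcx => by
        rcases List.mem_append.mp hcx with h | h
        exacts [hres c h, hcs c h])

-- ===== VERDICT (by name: the statement is the Claim_ definition above) =====
theorem minInteger_spec : Claim_equal_minInteger := by
  intro num k hdom hpre
  unfold Spec_minInteger
  unfold Pre_minInteger at hpre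
  have hPre : ∀ c ∈ num.toList, 48 ≤ c.toNat ∧ c.toNat ≤ 57 := by
    intro c hc
    have := List.all_eq_true.mp hpre c hc
    simpa using this
  have hA : minInteger num k = String.ofList (pvFinish num.toList
      (pvLoopA num.toList.length num.toList.length
        { k := k,
          dio := (PySem.List.enumerate num.toList 0).foldl
            (fun dio p =>
              let d := pvDigit p.2
              PySem.List.pySetD dio d (PySem.List.pyGetD dio d [] ++ [p.1]))
            (List.replicate 10 []),
          bit := (PySem.List.pyRange 0 (num.toList.length : Int) 1).foldl
            (fun t i => fenUpdate ((num.toList.length : Int)+1) t i 1)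
            (List.replicate (num.toList.length+1) 0),
          picked := List.replicate num.toList.length false,
          res := [] })) := rfl
  have hB : minInteger_alt num k
      = String.ofList ((pvLoopBI (num.toList.map pvDigit).length k
          (num.toList.map pvDigit) []).flatMap PySem.Int.toChars) := rfl
  have hBlen : (num.toList.map pvDigit).length = num.toList.length := List.length_map ..
  have hBsim : minInteger_alt num k
      = String.ofList (pvLoopB num.toList.length k num.toList []) := by
    rw [hB, hBlen]
    rw [show ([] : List Int) = ([] : List Char).map pvDigit from rfl]
    rw [pvLoopBI_sim num.toList.length k num.toList [] hPre (by intro c hc; cases hc)]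
  have hInv0 := pvInvInit num.toList k hPre
  have hrem0 : pvRem num.toList (PySem.List.pyRange 0 (num.toList.length : Int) 1)
      = num.toList := by
    unfold pvRem pvCharAt
    exact PySem.List.map_pyGetD_pyRange_zero' num.toList ' '
  have hlav : (PySem.List.pyRange 0 (num.toList.length : Int) 1).length = num.toList.length := by
    rw [PySem.List.length_pyRange_one]
    omega
  by_cases hk : 0 ≤ k
  · rw [hA, hBsim]
    rw [pvLoop_main num.toList num.toList.length _ _ hPre hInv0 hk (by rw [hlav])]
    rw [hrem0]
    simp
  · have hkneg : k < 0 := by omega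
    have hscanfix := pvScan_negk num.toList _ _ (PySem.List.pyRange 0 10 1)
      (fun d hd => by rw [PySem.List.mem_pyRange_one] at hd; exact ⟨hd.1, hd.2⟩)
      hInv0 (show k < 0 from hkneg)
    rw [hA, hBsim, pvLoopA_fix _ _ _ hscanfix]
    by_cases hn : num.toList.length = 0
    · have hcs : num.toList = [] := List.length_eq_zero_iff.mp hn
      rw [hcs]
      rfl
    · unfold pvFinish
      rw [if_pos (by simp only [List.length_nil]; omega)]
      rw [pvFill num.toList _ _ [] hInv0.1 hInv0.2.1 hInv0.2.2.2.2.2.2.1]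
      rw [hrem0, List.nil_append]
      rw [show num.toList.length = (num.toList.length - 1) + 1 from by omega]
      simp only [pvLoopB]
      rw [if_neg (fun hcon => by omega)]
      rw [List.nil_append]
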